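-- pv_equiv track=rewrite | github.com/ejin66/jemo | jemo.py | readLineFeed
-- ===== SOURCE A (Python) =====
-- def readLineFeed(data: str) -> str:
--     lineFeed = ""
--     for char in data:
--         if char == '\r' or char == '\n':
--             lineFeed += char
--         elif lineFeed == '':
--             continue
--         else:
--             break
--     return lineFeed
-- ===== SOURCE B (Python) =====
-- import re
--
-- def readLineFeed(data: str) -> str:
--     m = re.search(r'[\r\n]+', data)
--     return m.group() if m else ""
-- ===== Notes on version B (the rewrite author's own statement) =====
-- stated objective: idiomatic
-- what changed: Replaced the manual skip/collect/break character loop with a single regex search (re.search(r'[\r\n]+')) for the first maximal run of \r/\n; the C regex engine replaces per-character Python bytecode.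
import Mathlib
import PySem

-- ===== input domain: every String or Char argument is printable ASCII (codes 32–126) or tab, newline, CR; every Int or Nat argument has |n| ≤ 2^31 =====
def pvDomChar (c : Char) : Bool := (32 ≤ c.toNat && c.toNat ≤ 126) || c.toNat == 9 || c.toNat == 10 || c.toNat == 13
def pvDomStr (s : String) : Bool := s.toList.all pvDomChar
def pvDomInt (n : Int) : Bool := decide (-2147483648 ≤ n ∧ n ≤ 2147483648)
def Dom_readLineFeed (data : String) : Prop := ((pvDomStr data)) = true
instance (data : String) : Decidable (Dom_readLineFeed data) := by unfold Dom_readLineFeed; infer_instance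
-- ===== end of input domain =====

-- B replaces A's manual skip/collect/break loop with a regex search for the
-- first maximal run of '\r'/'\n'; objective: idiomatic, same complexity.

-- ===== PORT A =====
-- loop over the characters with accumulator lineFeed; 'break' = return the accumulator
def readLineFeedLoop : List Char → List Char → List Char
  | [], acc => acc
  | c :: cs, acc =>
    if c = '\r' ∨ c = '\n' then readLineFeedLoop cs (acc ++ [c])
    else if acc = [] then readLineFeedLoop cs acc
    else acc

def readLineFeed (data : String) : String :=
  String.ofList (readLineFeedLoop data.toList [])

-- ===== PORT B =====
-- transliteration of re.search(r'[\r\n]+', data): skip to the first feed char,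
-- then take the maximal feed run; none found = empty match result = ""
def pvIsFeed (c : Char) : Bool := c = '\r' || c = '\n'

def readLineFeed_alt (data : String) : String :=
  String.ofList (((data.toList.dropWhile (fun c => !pvIsFeed c)).takeWhile pvIsFeed))

-- ===== PRECONDITION & SPEC =====
def Spec_readLineFeed (data : String) (out : String) : Prop := out = readLineFeed_alt data
instance (data : String) (out : String) : Decidable (Spec_readLineFeed data out) := by unfold Spec_readLineFeed; infer_instance

-- ===== CLAIM (what is proved, stated in full; the proofs are below) =====
def Claim_equal_readLineFeed : Prop := ∀ (data : String), Dom_readLineFeed data → Spec_readLineFeed data (readLineFeed data)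

-- ===== LEMMAS AND PROOFS =====
theorem readLineFeedLoop_ne_nil (cs acc : List Char) (h : acc ≠ []) :
    readLineFeedLoop cs acc = acc ++ cs.takeWhile pvIsFeed := by
  induction cs generalizing acc with
  | nil => simp [readLineFeedLoop]
  | cons c cs ih =>
    by_cases hc : c = '\r' ∨ c = '\n'
    · simp [readLineFeedLoop, hc, List.takeWhile, pvIsFeed]
      rcases hc with hc | hc <;>
        · subst hc; rw [ih _ (by simp)]; simp
    · rw [not_or] at hc
      simp [readLineFeedLoop, hc, h, List.takeWhile, pvIsFeed]

theorem readLineFeedLoop_nil_acc (cs : List Char) :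
    readLineFeedLoop cs [] = (cs.dropWhile (fun c => !pvIsFeed c)).takeWhile pvIsFeed := by
  induction cs with
  | nil => simp [readLineFeedLoop]
  | cons c cs ih =>
    by_cases hc : c = '\r' ∨ c = '\n'
    · have hf : pvIsFeed c = true := by rcases hc with hc | hc <;> simp [pvIsFeed, hc]
      simp [readLineFeedLoop, hc, List.dropWhile, hf,
        readLineFeedLoop_ne_nil cs [c] (by simp)]
    · rw [not_or] at hc
      have hf : pvIsFeed c = false := by simp [pvIsFeed, hc.1, hc.2]
      simp [readLineFeedLoop, hc.1, hc.2, List.dropWhile, hf, ih]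

-- ===== VERDICT (by name: the statement is the Claim_ definition above) =====
theorem readLineFeed_spec : Claim_equal_readLineFeed := by
  intro data _
  unfold Spec_readLineFeed readLineFeed readLineFeed_alt
  rw [readLineFeedLoop_nil_acc]
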